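-- pv_equiv track=rewrite | github.com/rlyyah/erp_for_bill_gates | crm/crm.py | get_longest_name_id
-- ===== SOURCE A (Python) =====
-- id_index = 0
--
-- name_index = 1
--
-- def get_longest_name_id(table):
--     """
--         Question: What is the id of the customer with the longest name?
--         Args:
--             table(list): data table to work on
--         Returns:
--             string: id of the longest name(if there are more than one, return
--                 the last by alphabetical order of the names)
--         """
--
--     names = [line[name_index] for line in table]
--     length_of_names = []
--     for item in names:
--         n = len(item)
--         length_of_names.append(n)
--     longest = max(length_of_names)
--     # list_of_longest = []
--     id_name_dict = {}
--     for line in table: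
--         if len(line[name_index]) == longest:
--             id_name_dict[line[id_index]] = line[name_index]
--     longest_name_reverse_order = max(id_name_dict, key=id_name_dict.get)
--     return longest_name_reverse_order
-- ===== SOURCE B (Python) =====
-- id_index = 0
--
-- name_index = 1
--
-- def get_longest_name_id(table):
--     """One pass: keep the running max length and the id->name candidates of that length."""
--     longest = -1
--     cands = {}
--     for line in table:
--         name = line[name_index]
--         if len(name) > longest:
--             longest = len(name)
--             cands = {line[id_index]: name}
--         elif len(name) == longest:
--             cands[line[id_index]] = name
--     return max(cands, key=cands.get)
-- ===== Notes on version B (the rewrite author's own statement) =====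
-- stated objective: simpler
-- what changed: A's four sequential passes (name list, explicit length loop, max, dict-building loop) are replaced by a single pass that maintains the running maximum length and the id->name candidate dict, resetting it when a longer name appears.
import Mathlib
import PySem

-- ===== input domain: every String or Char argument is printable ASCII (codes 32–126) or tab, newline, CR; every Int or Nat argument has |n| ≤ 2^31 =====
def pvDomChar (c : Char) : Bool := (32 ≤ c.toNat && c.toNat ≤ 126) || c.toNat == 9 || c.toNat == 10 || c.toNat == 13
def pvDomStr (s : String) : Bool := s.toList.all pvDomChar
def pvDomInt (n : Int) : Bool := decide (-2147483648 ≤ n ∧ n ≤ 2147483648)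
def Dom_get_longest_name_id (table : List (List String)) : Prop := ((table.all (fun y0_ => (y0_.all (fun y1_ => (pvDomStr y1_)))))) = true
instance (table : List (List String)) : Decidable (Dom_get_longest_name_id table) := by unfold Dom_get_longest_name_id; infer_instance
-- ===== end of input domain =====

-- B replaces A's four sequential passes with one pass keeping the running max length and its id->name candidates.

-- line[name_index] / line[id_index]; the `.getD ""` default is only reached outside Pre_ (where Python raises IndexError)
def pvName (line : List String) : String := (PySem.List.pyGet? line 1).getD ""
def pvId (line : List String) : String := (PySem.List.pyGet? line 0).getD ""

-- ===== PORT A =====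
def get_longest_name_id (table : List (List String)) : String :=
  let names := table.map (fun line => pvName line)
  let length_of_names := names.foldl (fun acc item => acc ++ [PySem.Str.len item]) []
  let longest := (PySem.List.max? length_of_names (fun x => x)).getD 0  -- none only outside Pre_ (empty table)
  let id_name_dict := table.foldl
    (fun d line => if PySem.Str.len (pvName line) = longest then d.insert (pvId line) (pvName line) else d)
    (PySem.Dict.empty : PySem.Dict String String)
  -- max(id_name_dict, key=id_name_dict.get); every key is present, so .get is the value (the "" defaults never bind on Pre_)
  ((PySem.List.max? id_name_dict.keys (fun k => id_name_dict.getD k "")).getD "")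

-- ===== PORT B =====
-- loop body of B: name = line[name_index]; if len(name) > longest: reset; elif len(name) == longest: add
def pvBStep (st : Int × PySem.Dict String String) (line : List String) : Int × PySem.Dict String String :=
  let name := pvName line
  if PySem.Str.len name > st.1 then
    (PySem.Str.len name, (PySem.Dict.empty : PySem.Dict String String).insert (pvId line) name)
  else if PySem.Str.len name = st.1 then (st.1, st.2.insert (pvId line) name)
  else st

def get_longest_name_id_alt (table : List (List String)) : String :=
  let st := table.foldl pvBStep ((-1 : Int), (PySem.Dict.empty : PySem.Dict String String))
  -- max(cands, key=cands.get); none/"" defaults only bind outside Pre_ (empty table)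
  ((PySem.List.max? st.2.keys (fun k => st.2.getD k "")).getD "")

-- ===== PRECONDITION & SPEC =====
-- Pre_ excludes only the empty table and rows with fewer than 2 fields, on which A raises (ValueError / IndexError).
def Pre_get_longest_name_id (table : List (List String)) : Prop :=
  table ≠ [] ∧ ∀ l ∈ table, 2 ≤ l.length
instance (table : List (List String)) : Decidable (Pre_get_longest_name_id table) := by
  unfold Pre_get_longest_name_id; infer_instance

def pvWitness_get_longest_name_id : List (List String) := [["1", "alice"], ["2", "bob"]]

def Spec_get_longest_name_id (table : List (List String)) (out : String) : Prop := out = get_longest_name_id_alt table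
instance (table : List (List String)) (out : String) : Decidable (Spec_get_longest_name_id table out) := by unfold Spec_get_longest_name_id; infer_instance

-- ===== CLAIM (what is proved, stated in full; the proofs are below) =====
def Claim_equal_get_longest_name_id : Prop := ∀ (table : List (List String)), Dom_get_longest_name_id table → Pre_get_longest_name_id table → Spec_get_longest_name_id table (get_longest_name_id table)

-- ===== LEMMAS AND PROOFS =====

-- the numeric component of B's running state over t from initial value L
def pvMaxLen (t : List (List String)) (L : Int) : Int :=
  t.foldl (fun a l => max a (PySem.Str.len (pvName l))) L

theorem pvMaxLen_le (t : List (List String)) (L c : Int) (hL : L ≤ c)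
    (h : ∀ l ∈ t, PySem.Str.len (pvName l) ≤ c) : pvMaxLen t L ≤ c := by
  induction t generalizing L with
  | nil => exact hL
  | cons x s ih =>
    exact ih (max L (PySem.Str.len (pvName x)))
      (by have := h x (List.mem_cons_self ..); omega)
      (fun l hl => h l (List.mem_cons_of_mem _ hl))

-- B's single pass equals "running max" + "insert loop over the rows of maximal name length"
theorem pvB_fold (t : List (List String)) : ∀ (L : Int) (d : PySem.Dict String String),
    t.foldl pvBStep (L, d) = (pvMaxLen t L,
      (t.filter (fun l => decide (PySem.Str.len (pvName l) = pvMaxLen t L))).foldl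
        (fun d l => d.insert (pvId l) (pvName l))
        (if pvMaxLen t L = L then d else PySem.Dict.empty)) := by
  induction t with
  | nil => intro L d; simp [pvMaxLen]
  | cons x s ih =>
    intro L d
    have hM : pvMaxLen (x :: s) L = pvMaxLen s (max L (PySem.Str.len (pvName x))) := rfl
    have hle : max L (PySem.Str.len (pvName x)) ≤ pvMaxLen s (max L (PySem.Str.len (pvName x))) :=
      (PySem.List.le_foldl_max_int s (fun l => PySem.Str.len (pvName l)) _).1
    rw [List.foldl_cons, hM]
    by_cases h1 : PySem.Str.len (pvName x) > L
    · have hstep : pvBStep (L, d) x = (PySem.Str.len (pvName x),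
          (PySem.Dict.empty : PySem.Dict String String).insert (pvId x) (pvName x)) := by
        simp only [pvBStep]; rw [if_pos h1]
      have hmax : max L (PySem.Str.len (pvName x)) = PySem.Str.len (pvName x) := by omega
      rw [hstep, ih]
      rw [hmax] at hle ⊢
      by_cases h2 : pvMaxLen s (PySem.Str.len (pvName x)) = PySem.Str.len (pvName x)
      · rw [List.filter_cons_of_pos (by simp only [decide_eq_true_eq]; omega),
          if_pos h2, if_neg (show ¬ pvMaxLen s (PySem.Str.len (pvName x)) = L by omega),
          List.foldl_cons]
      · rw [List.filter_cons_of_neg (by simp only [decide_eq_true_eq]; omega),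
          if_neg h2, if_neg (show ¬ pvMaxLen s (PySem.Str.len (pvName x)) = L by omega)]
    · have hmax : max L (PySem.Str.len (pvName x)) = L := by omega
      rw [hmax] at hle ⊢
      by_cases h2 : PySem.Str.len (pvName x) = L
      · have hstep : pvBStep (L, d) x = (L, d.insert (pvId x) (pvName x)) := by
          simp only [pvBStep]; rw [if_neg (by omega), if_pos h2]
        rw [hstep, ih]
        by_cases h3 : pvMaxLen s L = L
        · rw [List.filter_cons_of_pos (by simp only [decide_eq_true_eq]; omega),
            if_pos h3, if_pos h3, List.foldl_cons]
        · rw [List.filter_cons_of_neg (by simp only [decide_eq_true_eq]; omega),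
            if_neg h3, if_neg h3]
      · have hstep : pvBStep (L, d) x = (L, d) := by
          simp only [pvBStep]; rw [if_neg (by omega), if_neg h2]
        rw [hstep, ih, List.filter_cons_of_neg (by simp only [decide_eq_true_eq]; omega)]

-- ===== VERDICT (by name: the statement is the Claim_ definition above) =====
theorem get_longest_name_id_spec : Claim_equal_get_longest_name_id := by
  intro table _hdom hpre
  obtain ⟨hne, _hlen⟩ := hpre
  unfold Spec_get_longest_name_id get_longest_name_id get_longest_name_id_alt
  simp only [PySem.List.foldl_append_singleton_eq_map, List.nil_append, List.map_map]
  -- the maximum length A computes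
  obtain ⟨m, hm⟩ : ∃ m, PySem.List.max? (table.map (PySem.Str.len ∘ pvName)) (fun x => x) = some m := by
    rcases h : PySem.List.max? (table.map (PySem.Str.len ∘ pvName)) (fun x => x) with _ | m
    · rw [PySem.List.max?_eq_none_iff, List.map_eq_nil_iff] at h; exact absurd h hne
    · exact ⟨m, rfl⟩
  have hub : ∀ l ∈ table, PySem.Str.len (pvName l) ≤ m := by
    intro l hl
    exact PySem.List.max?_isMax hm _ (List.mem_map_of_mem hl)
  obtain ⟨l0, hl0, hkl0⟩ : ∃ l ∈ table, PySem.Str.len (pvName l) = m := by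
    obtain ⟨l, hl, hkl⟩ := List.mem_map.mp (PySem.List.max?_mem hm)
    exact ⟨l, hl, hkl⟩
  have hm0 : 0 ≤ m := by
    rw [← hkl0]; simp only [PySem.Str.len_eq]; positivity
  -- B's running max equals m
  have hMm : pvMaxLen table (-1) = m := by
    have h1 : pvMaxLen table (-1) ≤ m := pvMaxLen_le table (-1) m (by omega) hub
    have h2 : m ≤ pvMaxLen table (-1) := by
      rw [← hkl0]
      exact (PySem.List.le_foldl_max_int table (fun l => PySem.Str.len (pvName l)) (-1)).2 l0 hl0
    omega
  simp only [hm, Option.getD_some, pvB_fold, hMm, ite_self, PySem.List.foldl_ite_eq_foldl_filter]
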